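-- pv_equiv track=rewrite | github.com/imYourChoi/algorithm_study | graph/dfs.py | dfs
-- ===== SOURCE A (Python) =====
-- def dfs(graph, visited, i, order):
--     temp = order + 1
--     visited[i][0] = True
--     visited[i][1] = order
--
--     for node in sorted(graph[i]):
--         if not visited[node][0]:
--             temp = dfs(graph, visited, node, temp)
--     return temp
-- ===== SOURCE B (Python) =====
-- def dfs(graph, visited, i, order):
--     # Iterative DFS with an explicit stack (reverse-sorted pushes, check-on-pop)
--     # instead of A's recursion; same preorder numbering and return counter.
--     visited[i][0] = True
--     visited[i][1] = order
--     counter = order + 1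
--     stack = sorted(graph[i], reverse=True)
--     while stack:
--         node = stack.pop()
--         if visited[node][0]:
--             continue
--         visited[node][0] = True
--         visited[node][1] = counter
--         counter += 1
--         stack.extend(sorted(graph[node], reverse=True))
--     return counter
-- ===== Notes on version B (the rewrite author's own statement) =====
-- stated objective: alternative
-- what changed: A's recursive DFS (call stack threads the numbering counter through nested calls) is replaced by an iterative explicit-stack loop: reverse-sorted pushes with a check-on-pop reproduce the same preorder numbering, mutation and final counter without recursion.
import Mathlib
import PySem

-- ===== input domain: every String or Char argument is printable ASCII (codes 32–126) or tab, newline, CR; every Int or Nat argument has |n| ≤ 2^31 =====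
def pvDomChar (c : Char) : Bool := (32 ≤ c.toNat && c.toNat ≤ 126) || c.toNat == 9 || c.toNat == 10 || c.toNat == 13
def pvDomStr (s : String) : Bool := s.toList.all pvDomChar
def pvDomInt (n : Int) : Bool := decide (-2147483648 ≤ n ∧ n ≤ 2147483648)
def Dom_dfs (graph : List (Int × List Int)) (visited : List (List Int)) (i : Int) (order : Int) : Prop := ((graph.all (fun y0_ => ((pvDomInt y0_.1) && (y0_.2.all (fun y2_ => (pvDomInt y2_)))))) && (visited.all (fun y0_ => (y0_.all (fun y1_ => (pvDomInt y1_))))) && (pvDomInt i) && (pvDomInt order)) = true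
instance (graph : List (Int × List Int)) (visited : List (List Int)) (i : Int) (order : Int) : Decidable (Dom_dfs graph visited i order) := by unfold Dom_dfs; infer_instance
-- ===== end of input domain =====

-- B replaces A's recursive DFS by an explicit-stack loop (reverse-sorted pushes, check-on-pop)
-- performing the same mutation of `visited` and returning the same counter; the theorem below
-- is about the return value.

-- ===== PORT A =====

-- visited[n][0] (Python truthiness: a flag is "visited" iff nonzero)
def pvFlag (v : List (List Int)) (n : Int) : Option Int :=
  (PySem.List.pyGet? v n).bind fun row => PySem.List.pyGet? row 0

-- the two statements  visited[n][0] = True ; visited[n][1] = c  (True stored as 1: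
-- only its truthiness is ever read, and the return value never depends on slot 1)
def pvMark (v : List (List Int)) (n c : Int) : Option (List (List Int)) :=
  (PySem.List.pyGet? v n).bind fun row =>
  (PySem.List.pySet? row 0 1).bind fun r1 =>
  (PySem.List.pySet? r1 1 c).bind fun r2 =>
  PySem.List.pySet? v n r2

-- number of rows whose flag entry is falsy (termination measure for B's loop below;
-- the next lemmas exist only so loopB's decreasing_by can cite pvMark_U_lt)
def pvU (v : List (List Int)) : Nat := v.countP (fun row => row.getD 0 0 == 0)

theorem pvIdx_lt (L : Nat) (n : Int) (j : Nat) (h : PySem.List.pyIdx? L n = some j) : j < L := by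
  unfold PySem.List.pyIdx? at h
  split_ifs at h <;> (injection h with h'; omega)

theorem pvCountP_set_lt {α : Type} (p : α → Bool) (v : List α) (j : Nat) (hj : j < v.length)
    (r : α) (hpr : p r = false) (hpj : p v[j] = true) :
    (v.set j r).countP p < v.countP p := by
  induction v generalizing j with
  | nil => simp at hj
  | cons a tl ih =>
    cases j with
    | zero => simp_all
    | succ j =>
      simp only [List.set_cons_succ, List.countP_cons]
      exact Nat.add_lt_add_right (ih j (by simpa using hj) (by simpa using hpj)) _

-- destructure a successful pvMark

theorem pvMarked_flag (row : List Int) (c : Int) (h : 0 < row.length) :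
    ((row.set 0 1).set 1 c).getD 0 0 = 1 := by
  rcases row with _ | ⟨a, t⟩
  · simp at h
  · rcases t with _ | ⟨b, t⟩ <;> simp [List.getD]

theorem pvMark_inv (v : List (List Int)) (n c : Int) (v' : List (List Int))
    (hm : pvMark v n c = some v') :
    ∃ (j : Nat) (hjv : j < v.length), PySem.List.pyIdx? v.length n = some j ∧
      2 ≤ (v[j]'hjv).length ∧ v' = v.set j (((v[j]'hjv).set 0 1).set 1 c) := by
  unfold pvMark at hm
  rw [Option.bind_eq_some_iff] at hm
  obtain ⟨row, hget, hm⟩ := hm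
  have hidx : ∃ j, PySem.List.pyIdx? v.length n = some j ∧ v[j]? = some row := by
    have : (PySem.List.pyIdx? v.length n).bind (fun k => v[k]?) = some row := hget
    rw [Option.bind_eq_some_iff] at this
    obtain ⟨j, h1, h2⟩ := this
    exact ⟨j, h1, h2⟩
  obtain ⟨j, hj, hrowj⟩ := hidx
  have hjv : j < v.length := pvIdx_lt _ _ _ hj
  have hrow_eq : v[j] = row := by
    rw [List.getElem?_eq_getElem hjv] at hrowj; injection hrowj
  rw [Option.bind_eq_some_iff] at hm
  obtain ⟨r1, hs1, hm⟩ := hm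
  rw [Option.bind_eq_some_iff] at hm
  obtain ⟨r2, hs2, hm⟩ := hm
  -- lengths from the successful sets
  have hL0 : 0 < row.length := by
    have : (PySem.List.pyIdx? row.length 0).map (fun k => row.set k (1:Int)) = some r1 := hs1
    rw [Option.map_eq_some_iff] at this
    obtain ⟨k, hk, _⟩ := this
    have := pvIdx_lt _ _ _ hk; omega
  have hr1 : r1 = row.set 0 1 := by
    have : (PySem.List.pyIdx? row.length 0).map (fun k => row.set k (1:Int)) = some r1 := hs1
    rw [show PySem.List.pyIdx? row.length 0 = some 0 by
      unfold PySem.List.pyIdx?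
      rw [if_pos (by norm_num), if_pos (by exact_mod_cast hL0)]
      rfl] at this
    simpa using this.symm
  have hL1 : 1 < r1.length := by
    have : (PySem.List.pyIdx? r1.length 1).map (fun k => r1.set k c) = some r2 := hs2
    rw [Option.map_eq_some_iff] at this
    obtain ⟨k, hk, _⟩ := this
    have hkl := pvIdx_lt _ _ _ hk
    unfold PySem.List.pyIdx? at hk
    split_ifs at hk <;> (injection hk with h'; omega)
  have hr2 : r2 = r1.set 1 c := by
    have : (PySem.List.pyIdx? r1.length 1).map (fun k => r1.set k c) = some r2 := hs2
    rw [show PySem.List.pyIdx? r1.length 1 = some 1 by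
      unfold PySem.List.pyIdx?
      rw [if_pos (by norm_num), if_pos (by exact_mod_cast hL1)]
      rfl] at this
    simpa using this.symm
  have hv' : v' = v.set j r2 := by
    have : (PySem.List.pyIdx? v.length n).map (fun k => v.set k r2) = some v' := hm
    rw [hj] at this; simpa using this.symm
  refine ⟨j, hjv, hj, ?_, ?_⟩
  · rw [hrow_eq]; rw [hr1] at hL1; simpa using hL1
  · rw [hv', hr2, hr1, hrow_eq]

theorem pvFlag_val (v : List (List Int)) (n : Int) (fl : Int) (h : pvFlag v n = some fl) :
    ∃ (j : Nat) (hjv : j < v.length), PySem.List.pyIdx? v.length n = some j ∧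
      0 < (v[j]'hjv).length ∧ (v[j]'hjv).getD 0 0 = fl := by
  unfold pvFlag at h
  rw [Option.bind_eq_some_iff] at h
  obtain ⟨row, hget, hfl⟩ := h
  have : (PySem.List.pyIdx? v.length n).bind (fun k => v[k]?) = some row := hget
  rw [Option.bind_eq_some_iff] at this
  obtain ⟨j, hj, hrowj⟩ := this
  have hjv : j < v.length := pvIdx_lt _ _ _ hj
  have hrow_eq : v[j] = row := by
    rw [List.getElem?_eq_getElem hjv] at hrowj; injection hrowj
  have h0 : row[0]? = some fl := by
    have := PySem.List.pyGet?_natCast row 0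
    simp only [Nat.cast_zero] at this
    rwa [this] at hfl
  have hL : 0 < row.length := by
    by_contra hh
    rw [List.getElem?_eq_none (by omega)] at h0; cases h0
  refine ⟨j, hjv, hj, by rw [hrow_eq]; exact hL, ?_⟩
  rw [hrow_eq]
  simp [List.getD, h0]

theorem pvMark_U_lt (v : List (List Int)) (n c : Int) (v' : List (List Int))
    (h0 : pvFlag v n = some 0) (hm : pvMark v n c = some v') : pvU v' < pvU v := by
  obtain ⟨j, hjv, hj, hrow, hv'⟩ := pvMark_inv v n c v' hm
  obtain ⟨j', hjv', hj', _, hflag⟩ := pvFlag_val v n 0 h0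
  rw [hj] at hj'; injection hj' with hjj; subst hjj
  rw [hv']
  unfold pvU
  have hpr : ((((v[j]'hjv).set 0 1).set 1 c).getD 0 0 == 0) = false := by
    rw [pvMarked_flag (v[j]'hjv) c (by omega)]; rfl
  have hpj : (((v[j]'hjv).getD 0 0 == 0) = true) := by rw [hflag]; rfl
  exact pvCountP_set_lt _ v j hjv _ hpr hpj

mutual
-- literal port of A; the Nat fuel only makes the nested recursion structural
-- (fuel visited.length + 2 provably suffices: lemma pvSuff below)
def dfsFuel (graph : List (Int × List Int)) (f : Nat) (v : List (List Int)) (i order : Int) :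
    Option (List (List Int) × Int) :=
  match f with
  | 0 => none
  | Nat.succ f' =>
    match pvMark v i order with
    | none => none
    | some v1 =>
      match PySem.Dict.get? (PySem.Dict.mk graph) i with
      | none => none
      | some ns => dfsLoop graph f' (PySem.List.sorted ns (fun x => x) false) v1 (order + 1)
termination_by (f, 0)

-- A's for-loop over sorted(graph[i]) with loop state (visited, temp)
def dfsLoop (graph : List (Int × List Int)) (f : Nat) (l : List Int) (v : List (List Int)) (t : Int) :
    Option (List (List Int) × Int) :=
  match l with
  | [] => some (v, t)
  | n :: l' =>
    match pvFlag v n with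
    | none => none
    | some fl =>
      if fl = 0 then
        match dfsFuel graph f v n t with
        | none => none
        | some (v', t') => dfsLoop graph f l' v' t'
      else dfsLoop graph f l' v t
termination_by (f, l.length + 1)
end

def dfs (graph : List (Int × List Int)) (visited : List (List Int)) (i : Int) (order : Int) : Int :=
  ((dfsFuel graph (visited.length + 1 + 1) visited i order).map Prod.snd).getD 0

-- ===== PORT B =====

-- Source B's while-loop.  The Python stack (top at the END, pushes are sorted(..., reverse=True),
-- pop from the end) is represented with the top at the HEAD of the Lean list; under that
-- representation push-reverse-sorted-then-pop-from-the-end is exactly prepending the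
-- ascending-sorted neighbour list.
def loopB (graph : List (Int × List Int)) (stk : List Int) (v : List (List Int)) (c : Int) :
    Option (List (List Int) × Int) :=
  match stk with
  | [] => some (v, c)
  | n :: stk' =>
    match h1 : pvFlag v n with
    | none => none
    | some fl =>
      if hfl : fl = 0 then
        match h2 : pvMark v n c with
        | none => none
        | some v' =>
          match PySem.Dict.get? (PySem.Dict.mk graph) n with
          | none => none
          | some ns => loopB graph (PySem.List.sorted ns (fun x => x) false ++ stk') v' (c + 1)
      else loopB graph stk' v c
termination_by (pvU v, stk.length)
decreasing_by
  · exact Prod.Lex.left _ _ (pvMark_U_lt v n c v' (hfl ▸ h1) h2)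
  · exact Prod.Lex.right _ (by simp [List.length_cons])

def dfs_alt (graph : List (Int × List Int)) (visited : List (List Int)) (i : Int) (order : Int) : Int :=
  match pvMark visited i order with                      -- visited[i][0] = True; visited[i][1] = order
  | none => 0
  | some v1 =>
    match PySem.Dict.get? (PySem.Dict.mk graph) i with   -- stack = sorted(graph[i], reverse=True)
    | none => 0
    | some ns =>
      ((loopB graph (PySem.List.sorted ns (fun x => x) false) v1 (order + 1)).map Prod.snd).getD 0

-- ===== PRECONDITION & SPEC =====

-- visited[n] exists and has at least the two slots the marking writes
def pvRow2 (v : List (List Int)) (n : Int) : Bool :=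
  match PySem.List.pyGet? v n with
  | some row => decide (2 ≤ row.length)
  | none => false

-- what A needs of a node u that appears in a traversed adjacency list:
-- its flag must be readable, and if u is unvisited it will be entered,
-- so it must be a graph key and its row must take the two-slot write
def pvGood (graph : List (Int × List Int)) (v0 : List (List Int)) (u : Int) : Prop :=
  (pvFlag v0 u).isSome = true ∧
  (pvFlag v0 u = some 0 →
    (PySem.Dict.get? (PySem.Dict.mk graph) u).isSome = true ∧ pvRow2 v0 u = true)

-- Pre_ excludes exactly the IndexError/KeyError inputs, as a closed-form
-- over-approximation: the root must be markable and a graph key, and every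
-- adjacency entry of the root's list or of any initially-unvisited key's list
-- (not only the reachable ones, which would need a fixpoint) must satisfy pvGood;
-- inputs where A returns because a bad entry is never reached are excluded too
-- (see claim cites).
def Pre_dfs (graph : List (Int × List Int)) (visited : List (List Int)) (i : Int) (order : Int) : Prop :=
  pvRow2 visited i = true ∧
  (PySem.Dict.get? (PySem.Dict.mk graph) i).isSome = true ∧
  (∀ p ∈ graph, (p.1 = i ∨ pvFlag visited p.1 = some 0) → ∀ u ∈ p.2, pvGood graph visited u)
instance (graph : List (Int × List Int)) (visited : List (List Int)) (i : Int) (order : Int) : Decidable (Pre_dfs graph visited i order) := by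
  unfold Pre_dfs pvGood; infer_instance

def pvWitness_dfs : (List (Int × List Int)) × List (List Int) × Int × Int :=
  ([(0, [1]), (1, [0, 2]), (2, [])], [[0, 0], [0, 0], [0, 0]], 0, 0)

def Spec_dfs (graph : List (Int × List Int)) (visited : List (List Int)) (i : Int) (order : Int) (out : Int) : Prop := out = dfs_alt graph visited i order
instance (graph : List (Int × List Int)) (visited : List (List Int)) (i : Int) (order : Int) (out : Int) : Decidable (Spec_dfs graph visited i order out) := by unfold Spec_dfs; infer_instance

-- ===== CLAIM (what is proved, stated in full; the proofs are below) =====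
def Claim_equal_dfs : Prop := ∀ (graph : List (Int × List Int)) (visited : List (List Int)) (i : Int) (order : Int), Dom_dfs graph visited i order → Pre_dfs graph visited i order → Spec_dfs graph visited i order (dfs graph visited i order)

-- ===== LEMMAS AND PROOFS =====

theorem pvCountP_set_le {α : Type} (p : α → Bool) (v : List α) (j : Nat) (r : α)
    (hpr : p r = false) : (v.set j r).countP p ≤ v.countP p := by
  induction v generalizing j with
  | nil => simp
  | cons a tl ih =>
    cases j with
    | zero => simp [List.countP_cons, hpr]
    | succ j =>
      simp only [List.set_cons_succ, List.countP_cons]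
      exact Nat.add_le_add_right (ih j) _

-- invariant of the traversal relative to the initial visited v0:
-- same length, same row lengths, and flags only ever go truthy
def pvInv (v0 w : List (List Int)) : Prop :=
  w.length = v0.length ∧
  ∀ j : Nat, j < v0.length →
    ((w.getD j []).length = (v0.getD j []).length ∧
     ((w.getD j []).getD 0 0 = 0 → (v0.getD j []).getD 0 0 = 0))

theorem pvInv_refl (v0 : List (List Int)) : pvInv v0 v0 :=
  ⟨rfl, fun _ _ => ⟨rfl, fun h => h⟩⟩

theorem pvGet_eq (v : List (List Int)) (n : Int) (j : Nat)
    (hj : PySem.List.pyIdx? v.length n = some j) (hjv : j < v.length) :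
    PySem.List.pyGet? v n = some v[j] := by
  show (PySem.List.pyIdx? v.length n).bind _ = _
  rw [hj]; simp [List.getElem?_eq_getElem hjv]

theorem pvSet_eq (v : List (List Int)) (n : Int) (j : Nat) (r : List Int)
    (hj : PySem.List.pyIdx? v.length n = some j) :
    PySem.List.pySet? v n r = some (v.set j r) := by
  show (PySem.List.pyIdx? v.length n).map _ = _
  rw [hj]; rfl

theorem pvMark_eq (v : List (List Int)) (n c : Int) (j : Nat)
    (hj : PySem.List.pyIdx? v.length n = some j) (hjv : j < v.length)
    (hrow : 2 ≤ v[j].length) :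
    pvMark v n c = some (v.set j ((v[j].set 0 1).set 1 c)) := by
  have h1 : PySem.List.pySet? v[j] (0:Int) 1 = some (v[j].set 0 1) := by
    simpa using PySem.List.pySet?_natCast v[j] 0 1 (by omega)
  have h2 : PySem.List.pySet? (v[j].set 0 1) (1:Int) c = some ((v[j].set 0 1).set 1 c) := by
    simpa using PySem.List.pySet?_natCast (v[j].set 0 1) 1 c (by simpa using (by omega : 1 < v[j].length))
  unfold pvMark
  rw [pvGet_eq v n j hj hjv]
  show (PySem.List.pySet? v[j] 0 1).bind _ = _
  rw [h1]
  show (PySem.List.pySet? (v[j].set 0 1) 1 c).bind _ = _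
  rw [h2]
  show PySem.List.pySet? v n ((v[j].set 0 1).set 1 c) = _
  exact pvSet_eq v n j _ hj

theorem pvFlag_eq (v : List (List Int)) (n : Int) (j : Nat)
    (hj : PySem.List.pyIdx? v.length n = some j) (hjv : j < v.length)
    (hrow : 0 < v[j].length) :
    pvFlag v n = some (v[j].getD 0 0) := by
  unfold pvFlag
  rw [pvGet_eq v n j hj hjv]
  show PySem.List.pyGet? v[j] 0 = _
  have := PySem.List.pyGet?_natCast v[j] 0
  simp only [Nat.cast_zero] at this
  rw [this, List.getElem?_eq_getElem hrow]
  simp [List.getD, List.getElem?_eq_getElem hrow]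

theorem pvRow2_val (v : List (List Int)) (n : Int) (h : pvRow2 v n = true) :
    ∃ (j : Nat) (hjv : j < v.length), PySem.List.pyIdx? v.length n = some j ∧
      2 ≤ (v[j]'hjv).length := by
  unfold pvRow2 at h
  cases hget : PySem.List.pyGet? v n with
  | none => rw [hget] at h; simp at h
  | some row =>
    rw [hget] at h
    have hlen : 2 ≤ row.length := by simpa using h
    have hb : (PySem.List.pyIdx? v.length n).bind (fun k => v[k]?) = some row := hget
    rw [Option.bind_eq_some_iff] at hb
    obtain ⟨j, hj, hrowj⟩ := hb
    have hjv : j < v.length := pvIdx_lt _ _ _ hj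
    have hrow_eq : v[j] = row := by
      rw [List.getElem?_eq_getElem hjv] at hrowj; injection hrowj
    exact ⟨j, hjv, hj, by rw [hrow_eq]; exact hlen⟩

theorem pvRow2_of (v : List (List Int)) (n : Int) (j : Nat)
    (hj : PySem.List.pyIdx? v.length n = some j) (hjv : j < v.length)
    (hrow : 2 ≤ v[j].length) : pvRow2 v n = true := by
  unfold pvRow2
  rw [pvGet_eq v n j hj hjv]
  simpa using hrow

-- row of w at the slot of n, compared with v0's: same slot, same length, monotone flag

theorem pvInv_row (v0 w : List (List Int)) (hI : pvInv v0 w) (j : Nat) (hj0 : j < v0.length) :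
    ∃ hjw : j < w.length,
      (w[j]'hjw).length = (v0[j]'hj0).length ∧
      ((w[j]'hjw).getD 0 0 = 0 → (v0[j]'hj0).getD 0 0 = 0) := by
  have hjw : j < w.length := by rw [hI.1]; exact hj0
  have h := hI.2 j hj0
  rw [List.getD_eq_getElem w [] hjw, List.getD_eq_getElem v0 [] hj0] at h
  exact ⟨hjw, h⟩

theorem pvFlag_transfer (v0 w : List (List Int)) (n : Int) (hI : pvInv v0 w)
    (h : (pvFlag v0 n).isSome = true) : (pvFlag w n).isSome = true := by
  obtain ⟨fl, hfl⟩ := Option.isSome_iff_exists.mp h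
  obtain ⟨j, hj0, hidx, hpos, -⟩ := pvFlag_val v0 n fl hfl
  obtain ⟨hjw, hlen, -⟩ := pvInv_row v0 w hI j hj0
  rw [pvFlag_eq w n j (by rw [hI.1]; exact hidx) hjw (by omega)]
  rfl

theorem pvFlag_transfer_zero (v0 w : List (List Int)) (n : Int) (hI : pvInv v0 w)
    (h : pvFlag w n = some 0) : pvFlag v0 n = some 0 := by
  obtain ⟨j, hjw, hidx, hpos, hval⟩ := pvFlag_val w n 0 h
  have hj0 : j < v0.length := by rw [← hI.1]; exact hjw
  obtain ⟨hjw', hlen, hmono⟩ := pvInv_row v0 w hI j hj0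
  rw [pvFlag_eq v0 n j (by rw [← hI.1]; exact hidx) hj0 (by omega), hmono hval]

theorem pvRow2_transfer (v0 w : List (List Int)) (n : Int) (hI : pvInv v0 w)
    (h : pvRow2 v0 n = true) : pvRow2 w n = true := by
  obtain ⟨j, hj0, hidx, hrow⟩ := pvRow2_val v0 n h
  obtain ⟨hjw, hlen, -⟩ := pvInv_row v0 w hI j hj0
  exact pvRow2_of w n j (by rw [hI.1]; exact hidx) hjw (by omega)

theorem pvMark_inv_pres (v0 w : List (List Int)) (n c : Int) (w' : List (List Int))
    (hI : pvInv v0 w) (hm : pvMark w n c = some w') : pvInv v0 w' := by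
  obtain ⟨j, hjw, hidx, hrow, hw'⟩ := pvMark_inv w n c w' hm
  subst hw'
  refine ⟨by simpa using hI.1, ?_⟩
  intro j' hj0
  have h := hI.2 j' hj0
  by_cases hjj : j = j'
  · subst hjj
    have hgd : (w.set j (((w[j]'hjw).set 0 1).set 1 c)).getD j [] =
        (((w[j]'hjw).set 0 1).set 1 c) := by
      simp [List.getD, List.getElem?_set_self, hjw]
    rw [hgd]
    constructor
    · simpa using (by rw [List.getD_eq_getElem w [] hjw] at h; exact h.1)
    · intro hc
      rw [pvMarked_flag (w[j]'hjw) c (by omega)] at hc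
      cases hc
  · have hgd : (w.set j (((w[j]'hjw).set 0 1).set 1 c)).getD j' [] =
        w.getD j' [] := by
      simp [List.getD, List.getElem?_set_ne hjj]
    rw [hgd]
    exact h

theorem pvMark_U_le (w : List (List Int)) (n c : Int) (w' : List (List Int))
    (hm : pvMark w n c = some w') : pvU w' ≤ pvU w := by
  obtain ⟨j, hjw, hidx, hrow, hw'⟩ := pvMark_inv w n c w' hm
  subst hw'
  have hpr : ((((w[j]'hjw).set 0 1).set 1 c).getD 0 0 == 0) = false := by
    rw [pvMarked_flag (w[j]'hjw) c (by omega)]; rfl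
  exact pvCountP_set_le _ w j _ hpr

theorem pvMark_succeeds (w : List (List Int)) (n c : Int) (h : pvRow2 w n = true) :
    ∃ w', pvMark w n c = some w' := by
  obtain ⟨j, hjv, hj, hrow⟩ := pvRow2_val w n h
  exact ⟨_, pvMark_eq w n c j hj hjv hrow⟩

theorem pvGet?_mk_mem (l : List (Int × List Int)) (n : Int) (ns : List Int)
    (h : (PySem.Dict.mk l).get? n = some ns) : (n, ns) ∈ l := by
  induction l with
  | nil => simp [PySem.Dict.get?] at h
  | cons p rest ih =>
    rcases p with ⟨k, vs⟩
    rw [PySem.Dict.get?_mk_cons] at h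
    by_cases hk : k == n
    · rw [if_pos hk] at h
      injection h with h
      have : k = n := eq_of_beq hk
      subst this; subst h
      exact List.mem_cons_self
    · rw [if_neg (by simpa using hk)] at h
      exact List.mem_cons_of_mem _ (ih h)

-- unfolding equations in usable form
theorem dfsLoop_nil (graph f v t) : dfsLoop graph f [] v t = some (v, t) := by
  rw [dfsLoop]

theorem dfsLoop_cons (graph f n l' v t) :
    dfsLoop graph f (n :: l') v t =
      match pvFlag v n with
      | none => none
      | some fl =>
        if fl = 0 then
          match dfsFuel graph f v n t with
          | none => none
          | some (v', t') => dfsLoop graph f l' v' t'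
        else dfsLoop graph f l' v t := by
  rw [dfsLoop]

theorem dfsLoop_cons_visit (graph f n l v t) (hfl : pvFlag v n = some 0) :
    dfsLoop graph f (n :: l) v t =
      match dfsFuel graph f v n t with
      | none => none
      | some (v', t') => dfsLoop graph f l v' t' := by
  rw [dfsLoop_cons, hfl]
  rfl

theorem dfsLoop_cons_skip (graph f n l v t fl) (hfl : pvFlag v n = some fl) (h0 : fl ≠ 0) :
    dfsLoop graph f (n :: l) v t = dfsLoop graph f l v t := by
  rw [dfsLoop_cons, hfl]
  simp only []
  rw [if_neg h0]

theorem dfsFuel_succ (graph f' v i order) :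
    dfsFuel graph (f' + 1) v i order =
      match pvMark v i order with
      | none => none
      | some v1 =>
        match PySem.Dict.get? (PySem.Dict.mk graph) i with
        | none => none
        | some ns => dfsLoop graph f' (PySem.List.sorted ns (fun x => x) false) v1 (order + 1) := by
  rw [dfsFuel]

theorem dfsFuel_zero (graph v i order) : dfsFuel graph 0 v i order = none := by
  rw [dfsFuel]

theorem loopB_nil (graph v c) : loopB graph [] v c = some (v, c) := by
  rw [loopB]

theorem loopB_cons_skip (graph n stk' v c fl) (h1 : pvFlag v n = some fl) (hfl : fl ≠ 0) :
    loopB graph (n :: stk') v c = loopB graph stk' v c := by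
  rw [loopB]
  split
  · simp_all
  · rename_i fl' h1'
    rw [h1] at h1'; injection h1' with h1'; subst h1'
    rw [dif_neg hfl]

theorem loopB_cons_visit (graph n stk' v c v' ns) (h1 : pvFlag v n = some 0)
    (h2 : pvMark v n c = some v') (hg : PySem.Dict.get? (PySem.Dict.mk graph) n = some ns) :
    loopB graph (n :: stk') v c =
      loopB graph (PySem.List.sorted ns (fun x => x) false ++ stk') v' (c + 1) := by
  rw [loopB]
  split
  · simp_all
  · rename_i fl' h1'
    rw [h1] at h1'; injection h1' with h1'; subst h1'
    rw [dif_pos rfl]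
    split
    · simp_all
    · rename_i v'' h2'
      rw [h2] at h2'; injection h2' with h2'; subst h2'
      rw [hg]

-- SIMULATION: whatever A's loop computes, B's stack loop computes, with the rest of the stack intact
theorem pvSim (graph : List (Int × List Int)) :
    ∀ f l v t v' t' rest, dfsLoop graph f l v t = some (v', t') →
      loopB graph (l ++ rest) v t = loopB graph rest v' t' := by
  intro f
  induction f using Nat.strong_induction_on with
  | _ f ihf =>
    intro l
    induction l with
    | nil =>
      intro v t v' t' rest h
      rw [dfsLoop_nil] at h
      simp only [Option.some.injEq, Prod.mk.injEq] at h
      obtain ⟨rfl, rfl⟩ := h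
      rw [List.nil_append]
    | cons n l ihl =>
      intro v t v' t' rest h
      cases hfl : pvFlag v n with
      | none =>
        rw [dfsLoop_cons, hfl] at h; simp at h
      | some fl =>
        by_cases h0 : fl = 0
        · subst h0
          rw [dfsLoop_cons_visit graph f n l v t hfl] at h
          cases f with
          | zero =>
            rw [dfsFuel_zero] at h; simp at h
          | succ f'' =>
            cases hdf : dfsFuel graph (f'' + 1) v n t with
            | none => rw [hdf] at h; simp at h
            | some p =>
              rcases p with ⟨v2, t2⟩
              rw [hdf] at h
              have h' : dfsLoop graph (f'' + 1) l v2 t2 = some (v', t') := h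
              rw [dfsFuel_succ] at hdf
              cases hm : pvMark v n t with
              | none => rw [hm] at hdf; simp at hdf
              | some v1 =>
                rw [hm] at hdf
                cases hg : PySem.Dict.get? (PySem.Dict.mk graph) n with
                | none => rw [hg] at hdf; simp at hdf
                | some ns =>
                  rw [hg] at hdf
                  rw [List.cons_append,
                    loopB_cons_visit graph n (l ++ rest) v t v1 ns hfl hm hg,
                    ihf f'' (by omega) (PySem.List.sorted ns (fun x => x) false) v1 (t + 1) v2 t2 (l ++ rest) hdf]
                  exact ihl v2 t2 v' t' rest h'
        · rw [dfsLoop_cons_skip graph f n l v t fl hfl h0] at h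
          rw [List.cons_append, loopB_cons_skip graph n (l ++ rest) v t fl hfl h0]
          exact ihl v t v' t' rest h

-- SUFFICIENCY: with fuel above pvU, A's port returns some (the fuel in dfs never runs out)
theorem pvSuff (graph : List (Int × List Int)) (v0 : List (List Int))
    (hG : ∀ p ∈ graph, pvFlag v0 p.1 = some 0 → ∀ u ∈ p.2, pvGood graph v0 u) :
    ∀ f, (∀ l w t, pvInv v0 w → (∀ n ∈ l, pvGood graph v0 n) → pvU w < f →
            ∃ w' t', dfsLoop graph f l w t = some (w', t') ∧ pvInv v0 w' ∧ pvU w' ≤ pvU w) ∧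
          (∀ w i t, pvInv v0 w → pvGood graph v0 i → pvFlag w i = some 0 → pvU w < f →
            ∃ w' t', dfsFuel graph f w i t = some (w', t') ∧ pvInv v0 w' ∧ pvU w' < pvU w) := by
  intro f
  induction f using Nat.strong_induction_on with
  | _ f ih =>
    have hQD : ∀ w i t, pvInv v0 w → pvGood graph v0 i → pvFlag w i = some 0 → pvU w < f →
        ∃ w' t', dfsFuel graph f w i t = some (w', t') ∧ pvInv v0 w' ∧ pvU w' < pvU w := by
      intro w i t hI hGd h0 hU
      cases f with
      | zero => omega
      | succ f' =>
        have h00 : pvFlag v0 i = some 0 := pvFlag_transfer_zero v0 w i hI h0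
        obtain ⟨hkey, hr2⟩ := hGd.2 h00
        obtain ⟨w1, hm⟩ := pvMark_succeeds w i t (pvRow2_transfer v0 w i hI hr2)
        have hI1 : pvInv v0 w1 := pvMark_inv_pres v0 w i t w1 hI hm
        have hUlt : pvU w1 < pvU w := pvMark_U_lt w i t w1 h0 hm
        obtain ⟨ns, hg⟩ := Option.isSome_iff_exists.mp hkey
        have hmem := pvGet?_mk_mem graph i ns hg
        have hns : ∀ n ∈ PySem.List.sorted ns (fun x => x) false, pvGood graph v0 n := by
          intro n hn
          exact hG _ hmem h00 n ((PySem.List.mem_sorted _ _ _ _).mp hn)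
        obtain ⟨w2, t2, hloop, hI2, hle2⟩ :=
          (ih f' (by omega)).1 (PySem.List.sorted ns (fun x => x) false) w1 (t + 1) hI1 hns (by omega)
        refine ⟨w2, t2, ?_, hI2, by omega⟩
        rw [dfsFuel_succ, hm]
        simp only []
        rw [hg]
        exact hloop
    refine ⟨?_, hQD⟩
    intro l
    induction l with
    | nil =>
      intro w t hI _ _
      exact ⟨w, t, dfsLoop_nil graph f w t, hI, le_refl _⟩
    | cons n l ihl =>
      intro w t hI hls hU
      have hGdn := hls n List.mem_cons_self
      obtain ⟨fl, hfl⟩ := Option.isSome_iff_exists.mp (pvFlag_transfer v0 w n hI hGdn.1)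
      by_cases h0 : fl = 0
      · subst h0
        obtain ⟨w2, t2, hdf, hI2, hlt2⟩ := hQD w n t hI hGdn hfl hU
        obtain ⟨w3, t3, hloop, hI3, hle3⟩ :=
          ihl w2 t2 hI2 (fun m hm => hls m (List.mem_cons_of_mem _ hm)) (by omega)
        refine ⟨w3, t3, ?_, hI3, by omega⟩
        rw [dfsLoop_cons_visit graph f n l w t hfl, hdf]
        exact hloop
      · obtain ⟨w3, t3, hloop, hI3, hle3⟩ :=
          ihl w t hI (fun m hm => hls m (List.mem_cons_of_mem _ hm)) hU
        refine ⟨w3, t3, ?_, hI3, hle3⟩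
        rw [dfsLoop_cons_skip graph f n l w t fl hfl h0]
        exact hloop

-- ===== VERDICT (by name: the statement is the Claim_ definition above) =====
theorem dfs_spec : Claim_equal_dfs := by
  intro graph visited i order _ hpre
  obtain ⟨hr2i, hkeyi, hcl⟩ := hpre
  obtain ⟨ji, hjiv, hji, hrowi⟩ := pvRow2_val visited i hr2i
  have hm := pvMark_eq visited i order ji hji hjiv hrowi
  have hI1 : pvInv visited (visited.set ji ((visited[ji].set 0 1).set 1 order)) :=
    pvMark_inv_pres visited visited i order _ (pvInv_refl visited) hm
  have hle1 : pvU (visited.set ji ((visited[ji].set 0 1).set 1 order)) ≤ pvU visited :=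
    pvMark_U_le visited i order _ hm
  obtain ⟨ns, hg⟩ := Option.isSome_iff_exists.mp hkeyi
  have hmem := pvGet?_mk_mem graph i ns hg
  have hG : ∀ p ∈ graph, pvFlag visited p.1 = some 0 → ∀ u ∈ p.2, pvGood graph visited u :=
    fun p hp h0 => hcl p hp (Or.inr h0)
  have hns : ∀ n ∈ PySem.List.sorted ns (fun x => x) false, pvGood graph visited n := by
    intro n hn
    exact hcl (i, ns) hmem (Or.inl rfl) n ((PySem.List.mem_sorted _ _ _ _).mp hn)
  have hUv : pvU visited ≤ visited.length := List.countP_le_length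
  obtain ⟨v2, t2, hloop, hI2, hle2⟩ :=
    (pvSuff graph visited hG (visited.length + 1)).1
      (PySem.List.sorted ns (fun x => x) false) _ (order + 1) hI1 hns (by omega)
  have hA : dfs graph visited i order = t2 := by
    unfold dfs
    have hfuel : dfsFuel graph (visited.length + 1 + 1) visited i order = some (v2, t2) := by
      rw [dfsFuel_succ, hm]
      simp only []
      rw [hg]
      exact hloop
    rw [hfuel]
    rfl
  have hB : dfs_alt graph visited i order = t2 := by
    unfold dfs_alt
    rw [hm]
    simp only []
    rw [hg]
    simp only []
    have hsim := pvSim graph (visited.length + 1)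
      (PySem.List.sorted ns (fun x => x) false) _ (order + 1) v2 t2 [] hloop
    rw [List.append_nil] at hsim
    rw [hsim, loopB_nil]
    rfl
  unfold Spec_dfs
  rw [hA, hB]
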